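-- pv_equiv track=rewrite | github.com/anix-lynch/Exponent | generate_p5_answers.py | generate_p5_short_answer
-- ===== SOURCE A (Python) =====
-- def generate_p5_short_answer(question_text, notes):
--     """Generate a short answer following P5 framework with line breaks."""
--
--     question_lower = question_text.lower()
--     notes_lower = notes.lower() if notes else ""
--
--     # Determine context
--     is_market = any(word in question_lower for word in ['market', 'geography', 'segment', 'target'])
--     is_user = any(word in question_lower for word in ['user', 'customer', 'audience', 'persona'])
--     is_churn = any(word in question_lower for word in ['churn', 'retention'])
--     is_engagement = any(word in question_lower for word in ['engagement', 'improve'])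
--     is_ecommerce = any(word in question_lower for word in ['e-commerce', 'ecommerce', 'platform'])
--     is_social = any(word in question_lower for word in ['social', 'instagram', 'whatsapp', 'facebook'])
--
--     parts = []
--
--     # 1. DEFINE PERSONAS (WHO)
--     personas = "Define Personas (WHO): Identify distinct user groups. "
--     if is_market:
--         personas += "Demographics: age, role, company size, geographic region. "
--         personas += "Context: job-to-be-done, use case, environment. "
--         personas += "Needs and constraints: what they need, what limits them."
--     elif is_ecommerce:
--         personas += "Demographics: age, income, shopping frequency. "
--         personas += "Context: shopping occasion (gift, personal, bulk), device preference. "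
--         personas += "Needs: price sensitivity, convenience, product discovery."
--     elif is_social:
--         personas += "Demographics: age, interests, social graph size. "
--         personas += "Context: content consumption vs creation, platform usage pattern. "
--         personas += "Needs: connection, entertainment, self-expression."
--     else:
--         personas += "Demographics: age, role, company size, location. "
--         personas += "Context: job-to-be-done, environment, use case. "
--         personas += "Needs and constraints: what they need, what limits them."
--
--     parts.append(personas)
--
--     # 2. DEFINE BEHAVIORS (HOW)
--     behaviors = "Define Behaviors (HOW): Map how users interact. "
--     behaviors += "Frequency: daily vs weekly vs occasional usage patterns. "
--     behaviors += "Depth: light users (basic features) vs power users (advanced features). "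
--     behaviors += "Lifecycle stage: new users vs active users vs mature users. "
--     if is_churn:
--         behaviors += "Churn indicators: usage decline, feature abandonment, support ticket patterns."
--     elif is_engagement:
--         behaviors += "Engagement patterns: session frequency, feature adoption, content interaction."
--     else:
--         behaviors += "Usage patterns: feature adoption, session length, return frequency."
--
--     parts.append(behaviors)
--
--     # 3. DEFINE VALUE (WHY THEY MATTER)
--     value = "Define Value (WHY THEY MATTER): Quantify segment importance. "
--     if is_ecommerce:
--         value += "Revenue: ARPU (average revenue per user), LTV (lifetime value), purchase frequency. "
--         value += "Strategic value: growth potential, referral rate, network effects. "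
--         value += "Cost/risk: support cost, return rate, churn risk."
--     elif is_social:
--         value += "Revenue: ad engagement, premium subscription rate, creator revenue share. "
--         value += "Strategic value: content creation, network effects, viral growth. "
--         value += "Cost/risk: moderation cost, platform abuse, churn risk."
--     else:
--         value += "Revenue: ARPU, LTV, conversion rate, retention. "
--         value += "Strategic value: growth potential, network effects, market position. "
--         value += "Cost/risk: support cost, churn risk, acquisition cost."
--
--     parts.append(value)
--
--     # 4. COMBINE INTO SEGMENTS
--     segments = "Combine into Segments: Create Persona × Behavior × Value matrix. "
--     segments += "Example: Persona A × Behavior X × High Value = Segment 1. "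
--     segments += "Persona B × Behavior Y × Medium Value = Segment 2. "
--     segments += "Persona C × Behavior Z × Low Value = Segment 3. "
--     segments += "Each segment is a unique combination of who they are, how they behave, and why they matter."
--
--     parts.append(segments)
--
--     # 5. RANK SEGMENTS
--     rank = "Rank Segments: Prioritize by impact and feasibility. "
--     rank += "Impact on core metric: which segment moves the needle most? "
--     rank += "Size and growth potential: current size and future growth trajectory. "
--     rank += "Effort to serve: how much work to address this segment's needs? "
--     rank += "Score: High Impact × Large Size × Low Effort = Top Priority."
--
--     parts.append(rank)
--
--     # 6. FOCUS
--     focus = "Focus: Choose primary and secondary segments. "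
--     focus += "Primary segment: default design target, gets most resources. "
--     focus += "Secondary segment: nice-to-have, addressed if resources allow. "
--     focus += "Deprioritize or ignore: segments that don't rank high enough. "
--     focus += "Design decisions should optimize for the primary segment first."
--
--     parts.append(focus)
--
--     # Join with double newlines (blank line between sections)
--     return "\n\n".join(parts)
-- ===== SOURCE B (Python) =====
-- SECTIONS = [
--     ("Define Personas (WHO): Identify distinct user groups. ",
--      [("market",
--        "Demographics: age, role, company size, geographic region. "
--        "Context: job-to-be-done, use case, environment. "
--        "Needs and constraints: what they need, what limits them."),
--       ("ecommerce",
--        "Demographics: age, income, shopping frequency. "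
--        "Context: shopping occasion (gift, personal, bulk), device preference. "
--        "Needs: price sensitivity, convenience, product discovery."),
--       ("social",
--        "Demographics: age, interests, social graph size. "
--        "Context: content consumption vs creation, platform usage pattern. "
--        "Needs: connection, entertainment, self-expression.")],
--      "Demographics: age, role, company size, location. "
--      "Context: job-to-be-done, environment, use case. "
--      "Needs and constraints: what they need, what limits them."),
--     ("Define Behaviors (HOW): Map how users interact. "
--      "Frequency: daily vs weekly vs occasional usage patterns. "
--      "Depth: light users (basic features) vs power users (advanced features). "
--      "Lifecycle stage: new users vs active users vs mature users. ",
--      [("churn",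
--        "Churn indicators: usage decline, feature abandonment, support ticket patterns."),
--       ("engagement",
--        "Engagement patterns: session frequency, feature adoption, content interaction.")],
--      "Usage patterns: feature adoption, session length, return frequency."),
--     ("Define Value (WHY THEY MATTER): Quantify segment importance. ",
--      [("ecommerce",
--        "Revenue: ARPU (average revenue per user), LTV (lifetime value), purchase frequency. "
--        "Strategic value: growth potential, referral rate, network effects. "
--        "Cost/risk: support cost, return rate, churn risk."),
--       ("social",
--        "Revenue: ad engagement, premium subscription rate, creator revenue share. "
--        "Strategic value: content creation, network effects, viral growth. "
--        "Cost/risk: moderation cost, platform abuse, churn risk.")],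
--      "Revenue: ARPU, LTV, conversion rate, retention. "
--      "Strategic value: growth potential, network effects, market position. "
--      "Cost/risk: support cost, churn risk, acquisition cost."),
--     ("Combine into Segments: Create Persona \u00d7 Behavior \u00d7 Value matrix. "
--      "Example: Persona A \u00d7 Behavior X \u00d7 High Value = Segment 1. "
--      "Persona B \u00d7 Behavior Y \u00d7 Medium Value = Segment 2. "
--      "Persona C \u00d7 Behavior Z \u00d7 Low Value = Segment 3. "
--      "Each segment is a unique combination of who they are, how they behave, and why they matter.",
--      [], ""),
--     ("Rank Segments: Prioritize by impact and feasibility. "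
--      "Impact on core metric: which segment moves the needle most? "
--      "Size and growth potential: current size and future growth trajectory. "
--      "Effort to serve: how much work to address this segment's needs? "
--      "Score: High Impact \u00d7 Large Size \u00d7 Low Effort = Top Priority.",
--      [], ""),
--     ("Focus: Choose primary and secondary segments. "
--      "Primary segment: default design target, gets most resources. "
--      "Secondary segment: nice-to-have, addressed if resources allow. "
--      "Deprioritize or ignore: segments that don't rank high enough. "
--      "Design decisions should optimize for the primary segment first.",
--      [], ""),
-- ]
--
-- KEYWORDS = [
--     ("market", ["market", "geography", "segment", "target"]),
--     ("user", ["user", "customer", "audience", "persona"]),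
--     ("churn", ["churn", "retention"]),
--     ("engagement", ["engagement", "improve"]),
--     ("ecommerce", ["e-commerce", "ecommerce", "platform"]),
--     ("social", ["social", "instagram", "whatsapp", "facebook"]),
-- ]
--
--
-- def generate_p5_short_answer(question_text, notes):
--     """Generate a short answer following P5 framework with line breaks."""
--     question_lower = question_text.lower()
--     notes_lower = notes.lower() if notes else ""
--
--     flags = {name: any(w in question_lower for w in words) for name, words in KEYWORDS}
--
--     parts = []
--     for base, variants, default in SECTIONS:
--         text = next((t for f, t in variants if flags[f]), default)
--         parts.append(base + text)
--     return "\n\n".join(parts)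
-- ===== Notes on version B (the rewrite author's own statement) =====
-- stated objective: idiomatic
-- what changed: A's six inline if/elif cascades building each section by string += are replaced by a data table of (base, ordered (flag, variant) pairs, default) sections driven by one loop that picks the first variant whose flag is true.
import Mathlib
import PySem

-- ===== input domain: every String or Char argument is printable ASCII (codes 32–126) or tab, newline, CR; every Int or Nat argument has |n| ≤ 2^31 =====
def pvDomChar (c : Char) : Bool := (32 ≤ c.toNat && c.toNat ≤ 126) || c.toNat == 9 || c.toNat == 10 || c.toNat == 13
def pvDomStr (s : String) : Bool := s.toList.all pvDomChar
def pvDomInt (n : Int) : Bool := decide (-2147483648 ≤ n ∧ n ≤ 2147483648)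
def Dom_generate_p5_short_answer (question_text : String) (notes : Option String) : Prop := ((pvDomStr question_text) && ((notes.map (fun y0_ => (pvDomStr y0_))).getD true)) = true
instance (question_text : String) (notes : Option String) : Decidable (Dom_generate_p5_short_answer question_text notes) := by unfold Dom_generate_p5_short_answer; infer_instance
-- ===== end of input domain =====

-- B replaces A's inline if/elif cascades by a table of (base, (flag, variant) pairs, default) sections driven by one loop (idiomatic; same cost).


-- ===== PORT A =====
-- 'any(word in question_lower for word in [...])' ported as List.any over PySem.Str.isIn.
def generate_p5_short_answer (question_text : String) (notes : Option String) : String :=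
  let question_lower := PySem.Str.lower question_text
  let _notes_lower := match notes with
    | some s => if s ≠ "" then PySem.Str.lower s else ""
    | none => ""
  let is_market := ["market", "geography", "segment", "target"].any (fun w => PySem.Str.isIn w question_lower)
  let _is_user := ["user", "customer", "audience", "persona"].any (fun w => PySem.Str.isIn w question_lower)
  let is_churn := ["churn", "retention"].any (fun w => PySem.Str.isIn w question_lower)
  let is_engagement := ["engagement", "improve"].any (fun w => PySem.Str.isIn w question_lower)
  let is_ecommerce := ["e-commerce", "ecommerce", "platform"].any (fun w => PySem.Str.isIn w question_lower)
  let is_social := ["social", "instagram", "whatsapp", "facebook"].any (fun w => PySem.Str.isIn w question_lower)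
  let personas := "Define Personas (WHO): Identify distinct user groups. " ++
    (if is_market then
      "Demographics: age, role, company size, geographic region. " ++
      "Context: job-to-be-done, use case, environment. " ++
      "Needs and constraints: what they need, what limits them."
    else if is_ecommerce then
      "Demographics: age, income, shopping frequency. " ++
      "Context: shopping occasion (gift, personal, bulk), device preference. " ++
      "Needs: price sensitivity, convenience, product discovery."
    else if is_social then
      "Demographics: age, interests, social graph size. " ++
      "Context: content consumption vs creation, platform usage pattern. " ++
      "Needs: connection, entertainment, self-expression."
    else
      "Demographics: age, role, company size, location. " ++
      "Context: job-to-be-done, environment, use case. " ++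
      "Needs and constraints: what they need, what limits them.")
  let parts := [personas]
  let behaviors := ("Define Behaviors (HOW): Map how users interact. " ++
    "Frequency: daily vs weekly vs occasional usage patterns. " ++
    "Depth: light users (basic features) vs power users (advanced features). " ++
    "Lifecycle stage: new users vs active users vs mature users. ") ++
    (if is_churn then "Churn indicators: usage decline, feature abandonment, support ticket patterns."
     else if is_engagement then "Engagement patterns: session frequency, feature adoption, content interaction."
     else "Usage patterns: feature adoption, session length, return frequency.")
  let parts := parts ++ [behaviors]
  let value := "Define Value (WHY THEY MATTER): Quantify segment importance. " ++
    (if is_ecommerce then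
      "Revenue: ARPU (average revenue per user), LTV (lifetime value), purchase frequency. " ++
      "Strategic value: growth potential, referral rate, network effects. " ++
      "Cost/risk: support cost, return rate, churn risk."
    else if is_social then
      "Revenue: ad engagement, premium subscription rate, creator revenue share. " ++
      "Strategic value: content creation, network effects, viral growth. " ++
      "Cost/risk: moderation cost, platform abuse, churn risk."
    else
      "Revenue: ARPU, LTV, conversion rate, retention. " ++
      "Strategic value: growth potential, network effects, market position. " ++
      "Cost/risk: support cost, churn risk, acquisition cost.")
  let parts := parts ++ [value]
  let segments := "Combine into Segments: Create Persona × Behavior × Value matrix. " ++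
    "Example: Persona A × Behavior X × High Value = Segment 1. " ++
    "Persona B × Behavior Y × Medium Value = Segment 2. " ++
    "Persona C × Behavior Z × Low Value = Segment 3. " ++
    "Each segment is a unique combination of who they are, how they behave, and why they matter."
  let parts := parts ++ [segments]
  let rank := "Rank Segments: Prioritize by impact and feasibility. " ++
    "Impact on core metric: which segment moves the needle most? " ++
    "Size and growth potential: current size and future growth trajectory. " ++
    "Effort to serve: how much work to address this segment's needs? " ++
    "Score: High Impact × Large Size × Low Effort = Top Priority."
  let parts := parts ++ [rank]
  let focus := "Focus: Choose primary and secondary segments. " ++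
    "Primary segment: default design target, gets most resources. " ++
    "Secondary segment: nice-to-have, addressed if resources allow. " ++
    "Deprioritize or ignore: segments that don't rank high enough. " ++
    "Design decisions should optimize for the primary segment first."
  let parts := parts ++ [focus]
  PySem.Str.join "\n\n" parts

-- ===== PORT B =====
-- Table-driven: a list of (base, ordered (flag, variant) pairs, default); first true flag wins.
def pvPick : List (Bool × String) → String → String
  | [], default => default
  | (f, t) :: rest, default => if f then t else pvPick rest default

def generate_p5_short_answer_alt (question_text : String) (notes : Option String) : String :=
  let question_lower := PySem.Str.lower question_text
  let _notes_lower := match notes with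
    | some s => if s ≠ "" then PySem.Str.lower s else ""
    | none => ""
  let is_market := ["market", "geography", "segment", "target"].any (fun w => PySem.Str.isIn w question_lower)
  let _is_user := ["user", "customer", "audience", "persona"].any (fun w => PySem.Str.isIn w question_lower)
  let is_churn := ["churn", "retention"].any (fun w => PySem.Str.isIn w question_lower)
  let is_engagement := ["engagement", "improve"].any (fun w => PySem.Str.isIn w question_lower)
  let is_ecommerce := ["e-commerce", "ecommerce", "platform"].any (fun w => PySem.Str.isIn w question_lower)
  let is_social := ["social", "instagram", "whatsapp", "facebook"].any (fun w => PySem.Str.isIn w question_lower)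
  let sections : List (String × List (Bool × String) × String) := [
    ("Define Personas (WHO): Identify distinct user groups. ",
     [(is_market, "Demographics: age, role, company size, geographic region. Context: job-to-be-done, use case, environment. Needs and constraints: what they need, what limits them."),
      (is_ecommerce, "Demographics: age, income, shopping frequency. Context: shopping occasion (gift, personal, bulk), device preference. Needs: price sensitivity, convenience, product discovery."),
      (is_social, "Demographics: age, interests, social graph size. Context: content consumption vs creation, platform usage pattern. Needs: connection, entertainment, self-expression.")],
     "Demographics: age, role, company size, location. Context: job-to-be-done, environment, use case. Needs and constraints: what they need, what limits them."),
    ("Define Behaviors (HOW): Map how users interact. Frequency: daily vs weekly vs occasional usage patterns. Depth: light users (basic features) vs power users (advanced features). Lifecycle stage: new users vs active users vs mature users. ",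
     [(is_churn, "Churn indicators: usage decline, feature abandonment, support ticket patterns."),
      (is_engagement, "Engagement patterns: session frequency, feature adoption, content interaction.")],
     "Usage patterns: feature adoption, session length, return frequency."),
    ("Define Value (WHY THEY MATTER): Quantify segment importance. ",
     [(is_ecommerce, "Revenue: ARPU (average revenue per user), LTV (lifetime value), purchase frequency. Strategic value: growth potential, referral rate, network effects. Cost/risk: support cost, return rate, churn risk."),
      (is_social, "Revenue: ad engagement, premium subscription rate, creator revenue share. Strategic value: content creation, network effects, viral growth. Cost/risk: moderation cost, platform abuse, churn risk.")],
     "Revenue: ARPU, LTV, conversion rate, retention. Strategic value: growth potential, network effects, market position. Cost/risk: support cost, churn risk, acquisition cost."),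
    ("Combine into Segments: Create Persona × Behavior × Value matrix. Example: Persona A × Behavior X × High Value = Segment 1. Persona B × Behavior Y × Medium Value = Segment 2. Persona C × Behavior Z × Low Value = Segment 3. Each segment is a unique combination of who they are, how they behave, and why they matter.", [], ""),
    ("Rank Segments: Prioritize by impact and feasibility. Impact on core metric: which segment moves the needle most? Size and growth potential: current size and future growth trajectory. Effort to serve: how much work to address this segment's needs? Score: High Impact × Large Size × Low Effort = Top Priority.", [], ""),
    ("Focus: Choose primary and secondary segments. Primary segment: default design target, gets most resources. Secondary segment: nice-to-have, addressed if resources allow. Deprioritize or ignore: segments that don't rank high enough. Design decisions should optimize for the primary segment first.", [], "")]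
  PySem.Str.join "\n\n" (sections.map (fun sec => sec.1 ++ pvPick sec.2.1 sec.2.2))

-- ===== PRECONDITION & SPEC =====
def Spec_generate_p5_short_answer (question_text : String) (notes : Option String) (out : String) : Prop := out = generate_p5_short_answer_alt question_text notes
instance (question_text : String) (notes : Option String) (out : String) : Decidable (Spec_generate_p5_short_answer question_text notes out) := by unfold Spec_generate_p5_short_answer; infer_instance

-- ===== CLAIM (what is proved, stated in full; the proofs are below) =====
def Claim_equal_generate_p5_short_answer : Prop := ∀ (question_text : String) (notes : Option String), Dom_generate_p5_short_answer question_text notes → Spec_generate_p5_short_answer question_text notes (generate_p5_short_answer question_text notes)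

-- ===== LEMMAS AND PROOFS =====
-- Each literal-concatenation chain of port A equals the single literal port B uses.
set_option maxRecDepth 20000 in
lemma pvCm1 : "Demographics: age, role, company size, geographic region. " ++
    "Context: job-to-be-done, use case, environment. " ++
    "Needs and constraints: what they need, what limits them." = "Demographics: age, role, company size, geographic region. Context: job-to-be-done, use case, environment. Needs and constraints: what they need, what limits them." := by decide

set_option maxRecDepth 20000 in
lemma pvCe1 : "Demographics: age, income, shopping frequency. " ++
    "Context: shopping occasion (gift, personal, bulk), device preference. " ++
    "Needs: price sensitivity, convenience, product discovery." = "Demographics: age, income, shopping frequency. Context: shopping occasion (gift, personal, bulk), device preference. Needs: price sensitivity, convenience, product discovery." := by decide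

set_option maxRecDepth 20000 in
lemma pvCs1 : "Demographics: age, interests, social graph size. " ++
    "Context: content consumption vs creation, platform usage pattern. " ++
    "Needs: connection, entertainment, self-expression." = "Demographics: age, interests, social graph size. Context: content consumption vs creation, platform usage pattern. Needs: connection, entertainment, self-expression." := by decide

set_option maxRecDepth 20000 in
lemma pvCd1 : "Demographics: age, role, company size, location. " ++
    "Context: job-to-be-done, environment, use case. " ++
    "Needs and constraints: what they need, what limits them." = "Demographics: age, role, company size, location. Context: job-to-be-done, environment, use case. Needs and constraints: what they need, what limits them." := by decide

set_option maxRecDepth 20000 in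
lemma pvCbeh : "Define Behaviors (HOW): Map how users interact. " ++
    "Frequency: daily vs weekly vs occasional usage patterns. " ++
    "Depth: light users (basic features) vs power users (advanced features). " ++
    "Lifecycle stage: new users vs active users vs mature users. " = "Define Behaviors (HOW): Map how users interact. Frequency: daily vs weekly vs occasional usage patterns. Depth: light users (basic features) vs power users (advanced features). Lifecycle stage: new users vs active users vs mature users. " := by decide

set_option maxRecDepth 20000 in
lemma pvCe3 : "Revenue: ARPU (average revenue per user), LTV (lifetime value), purchase frequency. " ++
    "Strategic value: growth potential, referral rate, network effects. " ++
    "Cost/risk: support cost, return rate, churn risk." = "Revenue: ARPU (average revenue per user), LTV (lifetime value), purchase frequency. Strategic value: growth potential, referral rate, network effects. Cost/risk: support cost, return rate, churn risk." := by decide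

set_option maxRecDepth 20000 in
lemma pvCs3 : "Revenue: ad engagement, premium subscription rate, creator revenue share. " ++
    "Strategic value: content creation, network effects, viral growth. " ++
    "Cost/risk: moderation cost, platform abuse, churn risk." = "Revenue: ad engagement, premium subscription rate, creator revenue share. Strategic value: content creation, network effects, viral growth. Cost/risk: moderation cost, platform abuse, churn risk." := by decide

set_option maxRecDepth 20000 in
lemma pvCd3 : "Revenue: ARPU, LTV, conversion rate, retention. " ++
    "Strategic value: growth potential, network effects, market position. " ++
    "Cost/risk: support cost, churn risk, acquisition cost." = "Revenue: ARPU, LTV, conversion rate, retention. Strategic value: growth potential, network effects, market position. Cost/risk: support cost, churn risk, acquisition cost." := by decide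

set_option maxRecDepth 20000 in
lemma pvCseg : "Combine into Segments: Create Persona × Behavior × Value matrix. " ++
    "Example: Persona A × Behavior X × High Value = Segment 1. " ++
    "Persona B × Behavior Y × Medium Value = Segment 2. " ++
    "Persona C × Behavior Z × Low Value = Segment 3. " ++
    "Each segment is a unique combination of who they are, how they behave, and why they matter." = "Combine into Segments: Create Persona × Behavior × Value matrix. Example: Persona A × Behavior X × High Value = Segment 1. Persona B × Behavior Y × Medium Value = Segment 2. Persona C × Behavior Z × Low Value = Segment 3. Each segment is a unique combination of who they are, how they behave, and why they matter." := by decide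

set_option maxRecDepth 20000 in
lemma pvCrank : "Rank Segments: Prioritize by impact and feasibility. " ++
    "Impact on core metric: which segment moves the needle most? " ++
    "Size and growth potential: current size and future growth trajectory. " ++
    "Effort to serve: how much work to address this segment's needs? " ++
    "Score: High Impact × Large Size × Low Effort = Top Priority." = "Rank Segments: Prioritize by impact and feasibility. Impact on core metric: which segment moves the needle most? Size and growth potential: current size and future growth trajectory. Effort to serve: how much work to address this segment's needs? Score: High Impact × Large Size × Low Effort = Top Priority." := by decide

set_option maxRecDepth 20000 in
lemma pvCfocus : "Focus: Choose primary and secondary segments. " ++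
    "Primary segment: default design target, gets most resources. " ++
    "Secondary segment: nice-to-have, addressed if resources allow. " ++
    "Deprioritize or ignore: segments that don't rank high enough. " ++
    "Design decisions should optimize for the primary segment first." = "Focus: Choose primary and secondary segments. Primary segment: default design target, gets most resources. Secondary segment: nice-to-have, addressed if resources allow. Deprioritize or ignore: segments that don't rank high enough. Design decisions should optimize for the primary segment first." := by decide

lemma pvAppendEmpty (s : String) : s ++ "" = s := by simp

-- ===== VERDICT (by name: the statement is the Claim_ definition above) =====
set_option maxRecDepth 8000 in
theorem generate_p5_short_answer_spec : Claim_equal_generate_p5_short_answer := by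
  intro question_text notes _
  unfold Spec_generate_p5_short_answer generate_p5_short_answer generate_p5_short_answer_alt
  simp only [pvCm1, pvCe1, pvCs1, pvCd1, pvCbeh, pvCe3, pvCs3, pvCd3, pvCseg, pvCrank, pvCfocus,
    pvPick, List.map, pvAppendEmpty, List.cons_append, List.nil_append]
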